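-- pv_equiv track=rewrite | github.com/piedrro/DeepGapSeq | src/DeepGapSeq/GUI/gui_trace_plot_utils.py | sort_plot_labels
-- ===== SOURCE A (Python) =====
-- def sort_plot_labels(plot_labels):
--
--     try:
--
--         reference_list = ["Donor", "Acceptor", "FRET Efficiency",
--                           "DD", "AA", "DA", "AD","ALEX Efficiency",]
--
--         order = {key: i for i, key in enumerate(reference_list)}
--
--         # Sort the actual list based on the order defined in the reference list
--         sorted_list = sorted(plot_labels, key=lambda x: order.get(x, float('inf')))
--
--     except:
--         pass
--
--     return sorted_list
-- ===== SOURCE B (Python) =====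
-- def sort_plot_labels(plot_labels):
--     # Bucket partition instead of sorted(): known labels grouped in reference
--     # order, unknown labels appended afterwards in their original order
--     # (exactly the order a stable sort by reference rank produces).
--     reference_list = ["Donor", "Acceptor", "FRET Efficiency",
--                       "DD", "AA", "DA", "AD", "ALEX Efficiency"]
--     reference_set = set(reference_list)
--     out = []
--     for ref in reference_list:
--         for x in plot_labels:
--             if x == ref:
--                 out.append(x)
--     for x in plot_labels:
--         if x not in reference_set:
--             out.append(x)
--     return out
-- ===== Notes on version B (the rewrite author's own statement) =====
-- stated objective: alternative
-- what changed: Replaces the sorted() call keyed by a rank dict with an explicit bucket partition: one pass per reference label collecting its occurrences in order, then one pass appending the unknown labels, reproducing the stable sort's output without sorting.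
import Mathlib
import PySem

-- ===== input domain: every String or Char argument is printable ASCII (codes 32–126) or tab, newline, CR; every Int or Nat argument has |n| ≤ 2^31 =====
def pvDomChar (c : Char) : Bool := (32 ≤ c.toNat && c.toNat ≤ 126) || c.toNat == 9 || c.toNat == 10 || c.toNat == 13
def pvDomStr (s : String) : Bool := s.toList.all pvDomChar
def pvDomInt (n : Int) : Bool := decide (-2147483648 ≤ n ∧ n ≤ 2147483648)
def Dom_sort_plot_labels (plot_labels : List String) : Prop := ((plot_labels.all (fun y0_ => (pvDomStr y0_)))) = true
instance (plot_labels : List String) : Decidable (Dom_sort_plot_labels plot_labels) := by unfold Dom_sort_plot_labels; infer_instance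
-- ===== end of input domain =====

-- B replaces the sorted() call keyed by a rank dict with an explicit bucket partition
-- (one collecting pass per reference label, then one pass for the unknown labels): an
-- alternative decomposition reproducing the stable sort's output without sorting.

-- the reference_list literal both Python versions contain
def pvReferenceList : List String :=
  ["Donor", "Acceptor", "FRET Efficiency", "DD", "AA", "DA", "AD", "ALEX Efficiency"]

-- ===== PORT A =====
def sort_plot_labels (plot_labels : List String) : List String :=
  -- order = {key: i for i, key in enumerate(reference_list)}
  let order : PySem.Dict String Int :=
    (PySem.List.enumerate pvReferenceList).foldl (fun d p => d.insert p.2 p.1) (PySem.Dict.mk [])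
  -- sorted(plot_labels, key=lambda x: order.get(x, float('inf')));  float('inf') is
  -- ported as 8: every rank stored in `order` is 0–7, so all key comparisons are identical
  PySem.List.sorted plot_labels (fun x => (order.get? x).getD 8) false

-- ===== PORT B =====
def sort_plot_labels_alt (plot_labels : List String) : List String :=
  let reference_set : PySem.Set String := PySem.Set.ofList pvReferenceList
  let out1 := pvReferenceList.foldl
    (fun acc ref => plot_labels.foldl (fun a2 x => if x == ref then a2 ++ [x] else a2) acc) []
  plot_labels.foldl (fun acc x => if !(reference_set.contains x) then acc ++ [x] else acc) out1

-- ===== PRECONDITION & SPEC =====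
def Spec_sort_plot_labels (plot_labels : List String) (out : List String) : Prop := out = sort_plot_labels_alt plot_labels
instance (plot_labels : List String) (out : List String) : Decidable (Spec_sort_plot_labels plot_labels out) := by unfold Spec_sort_plot_labels; infer_instance

-- ===== CLAIM (what is proved, stated in full; the proofs are below) =====
def Claim_equal_sort_plot_labels : Prop := ∀ (plot_labels : List String), Dom_sort_plot_labels plot_labels → Spec_sort_plot_labels plot_labels (sort_plot_labels plot_labels)

-- ===== LEMMAS AND PROOFS =====

-- insertBy passes over a prefix none of whose elements x goes before
theorem pv_insertBy_append_left {α : Type} (before : α → α → Bool) (x : α) (l1 l2 : List α)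
    (h : ∀ y ∈ l1, before x y = false) :
    PySem.List.insertBy before x (l1 ++ l2) = l1 ++ PySem.List.insertBy before x l2 := by
  induction l1 with
  | nil => simp
  | cons y t ih =>
    simp only [List.cons_append, PySem.List.insertBy, h y (by simp)]
    simp only [Bool.false_eq_true, if_false, List.cons.injEq, true_and]
    exact ih (fun z hz => h z (by simp [hz]))

-- insertBy puts x in front when x goes before every element
theorem pv_insertBy_front {α : Type} (before : α → α → Bool) (x : α) (l : List α)
    (h : ∀ y ∈ l, before x y = true) :
    PySem.List.insertBy before x l = x :: l := by
  cases l with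
  | nil => rfl
  | cons y t => simp [PySem.List.insertBy, h y (by simp)]

-- a snoc does not change the buckets of labels it does not equal
theorem pv_flatMap_filter_snoc (P pl : List String) (x : String) (h : ∀ r ∈ P, x ≠ r) :
    P.flatMap (fun r => (pl ++ [x]).filter (fun y => y == r))
      = P.flatMap (fun r => pl.filter (fun y => y == r)) := by
  induction P with
  | nil => rfl
  | cons r t ih =>
    have hh : (pl ++ [x]).filter (fun y => y == r) = pl.filter (fun y => y == r) := by
      simp [List.filter_append, h r (by simp)]
    simp only [List.flatMap_cons, hh, ih (fun s hs => h s (by simp [hs]))]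

-- the stable sort by reference rank is the bucket partition
theorem pv_sorted_eq_part (key : String → Int) (c : Int) (refs : List String)
    (h1 : refs.Pairwise (fun a b => key a < key b))
    (hc : ∀ x, x ∉ refs → key x = c)
    (hlt : ∀ r ∈ refs, key r < c) (pl : List String) :
    PySem.List.sorted pl key false
      = refs.flatMap (fun r => pl.filter (fun y => y == r))
        ++ pl.filter (fun y => !(refs.contains y)) := by
  rw [PySem.List.sorted_eq_foldl_insertBy]
  induction pl using List.reverseRecOn with
  | nil => simp
  | append_singleton pl x ih =>
    rw [List.foldl_append, List.foldl_cons, List.foldl_nil, ih]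
    have hmemF : ∀ r y, y ∈ pl.filter (fun z => z == r) → y = r := by
      intro r y hy
      have := List.of_mem_filter hy
      simpa using this
    have hmemO : ∀ y ∈ pl.filter (fun z => !(refs.contains z)), y ∉ refs := by
      intro y hy
      have := List.of_mem_filter hy
      simpa using this
    by_cases hx : x ∈ refs
    · -- split refs at the first occurrence of x
      have hsome : (PySem.List.index? refs x).isSome := (PySem.List.index?_isSome_iff refs x).2 hx
      obtain ⟨k, hk⟩ := Option.isSome_iff_exists.1 hsome
      obtain ⟨P, S, hrefs, -, hxP⟩ := (PySem.List.index?_eq_some_iff refs x k).1 hk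
      have hnd : refs.Nodup := h1.imp (fun h => fun hab => absurd (hab ▸ h) (lt_irrefl _))
      have hnd' := hnd
      rw [hrefs, List.nodup_middle] at hnd'
      have hxPS : ∀ a ∈ P ++ S, x ≠ a := (List.pairwise_cons.mp hnd').1
      have hxnP : ∀ r ∈ P, x ≠ r := fun r hr => hxPS r (List.mem_append_left S hr)
      have hxnS : ∀ r ∈ S, x ≠ r := fun r hr => hxPS r (List.mem_append_right P hr)
      have h1' := h1
      rw [hrefs, List.pairwise_append] at h1'
      obtain ⟨-, hpx, hcross⟩ := h1'
      have hxltS : ∀ s ∈ S, key x < key s := (List.pairwise_cons.mp hpx).1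
      have hPx : ∀ p ∈ P, key p < key x := fun p hp => hcross p hp x (by simp)
      have ha : ∀ y ∈ P.flatMap (fun r => pl.filter (fun z => z == r)),
          (fun a b => decide (key a < key b)) x y = false := by
        intro y hy
        obtain ⟨r, hr, hyr⟩ := List.mem_flatMap.1 hy
        have := hmemF r y hyr; subst this
        simp [decide_eq_false_iff_not, not_lt, le_of_lt (hPx y hr)]
      have hb : ∀ y ∈ pl.filter (fun z => z == x),
          (fun a b => decide (key a < key b)) x y = false := by
        intro y hy
        have := hmemF x y hy; subst this; simp
      have hcfront : ∀ y ∈ S.flatMap (fun r => pl.filter (fun z => z == r))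
            ++ pl.filter (fun z => !((P ++ x :: S).contains z)),
          (fun a b => decide (key a < key b)) x y = true := by
        intro y hy
        rcases List.mem_append.1 hy with hy | hy
        · obtain ⟨r, hr, hyr⟩ := List.mem_flatMap.1 hy
          have := hmemF r y hyr; subst this
          simp [hxltS y hr]
        · have hyn : y ∉ P ++ x :: S := by
            have := List.of_mem_filter hy; simpa using this
          have hyc : key y = c := hc y (hrefs ▸ hyn)
          simp [hyc, hlt x hx]
      have hstep : PySem.List.insertBy (fun a b => decide (key a < key b)) x
            (P.flatMap (fun r => pl.filter (fun z => z == r))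
              ++ (pl.filter (fun z => z == x)
                ++ (S.flatMap (fun r => pl.filter (fun z => z == r))
                  ++ pl.filter (fun z => !((P ++ x :: S).contains z)))))
          = P.flatMap (fun r => pl.filter (fun z => z == r))
              ++ (pl.filter (fun z => z == x)
                ++ (x :: (S.flatMap (fun r => pl.filter (fun z => z == r))
                  ++ pl.filter (fun z => !((P ++ x :: S).contains z))))) := by
        rw [pv_insertBy_append_left _ _ _ _ ha, pv_insertBy_append_left _ _ _ _ hb,
          pv_insertBy_front _ _ _ hcfront]
      have hbx : (pl ++ [x]).filter (fun z => z == x)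
          = pl.filter (fun z => z == x) ++ [x] := by
        simp [List.filter_append]
      have hox : (pl ++ [x]).filter (fun z => !((P ++ x :: S).contains z))
          = pl.filter (fun z => !((P ++ x :: S).contains z)) := by
        simp [List.filter_append]
      rw [hrefs]
      simp only [List.flatMap_append, List.flatMap_cons]
      rw [pv_flatMap_filter_snoc P pl x hxnP, pv_flatMap_filter_snoc S pl x hxnS, hbx, hox]
      simp only [List.append_assoc]
      rw [hstep]
      simp
    · -- x unknown: it lands at the very end
      rw [PySem.List.insertBy_of_forall_not_before _ x _ ?hall]
      case hall =>
        intro y hy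
        rcases List.mem_append.1 hy with hy | hy
        · obtain ⟨r, hr, hyr⟩ := List.mem_flatMap.1 hy
          have : y = r := hmemF r y hyr
          subst this
          simp [decide_eq_false_iff_not, not_lt, hc x hx, le_of_lt (hlt y hr)]
        · have : key y = c := hc y (hmemO y hy)
          simp [this, hc x hx]
      have hxn : ∀ r ∈ refs, x ≠ r := fun r hr heq => hx (heq ▸ hr)
      rw [pv_flatMap_filter_snoc refs pl x hxn]
      have hox : (pl ++ [x]).filter (fun y => !(refs.contains y))
          = pl.filter (fun y => !(refs.contains y)) ++ [x] := by
        simp [List.filter_append, hx]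
      rw [hox]
      simp

-- the concrete rank dict of port A, evaluated
def pvOrder : PySem.Dict String Int :=
  (PySem.List.enumerate pvReferenceList).foldl (fun d p => d.insert p.2 p.1) (PySem.Dict.mk [])

def pvKey (x : String) : Int := (pvOrder.get? x).getD 8

theorem pv_key_of_not_mem (x : String) (hx : x ∉ pvReferenceList) : pvKey x = 8 := by
  simp only [pvReferenceList, List.mem_cons, List.not_mem_nil, or_false, not_or] at hx
  obtain ⟨n1, n2, n3, n4, n5, n6, n7, n8⟩ := hx
  have e : pvOrder.items = [("Donor", (0:Int)), ("Acceptor", 1), ("FRET Efficiency", 2),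
      ("DD", 3), ("AA", 4), ("DA", 5), ("AD", 6), ("ALEX Efficiency", 7)] := by rfl
  have b1 : ("Donor" == x) = false := beq_eq_false_iff_ne.mpr (Ne.symm n1)
  have b2 : ("Acceptor" == x) = false := beq_eq_false_iff_ne.mpr (Ne.symm n2)
  have b3 : ("FRET Efficiency" == x) = false := beq_eq_false_iff_ne.mpr (Ne.symm n3)
  have b4 : ("DD" == x) = false := beq_eq_false_iff_ne.mpr (Ne.symm n4)
  have b5 : ("AA" == x) = false := beq_eq_false_iff_ne.mpr (Ne.symm n5)
  have b6 : ("DA" == x) = false := beq_eq_false_iff_ne.mpr (Ne.symm n6)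
  have b7 : ("AD" == x) = false := beq_eq_false_iff_ne.mpr (Ne.symm n7)
  have b8 : ("ALEX Efficiency" == x) = false := beq_eq_false_iff_ne.mpr (Ne.symm n8)
  simp [pvKey, PySem.Dict.get?, e, List.find?, b1, b2, b3, b4, b5, b6, b7, b8]

theorem pv_A_eq_part (pl : List String) :
    sort_plot_labels pl
      = pvReferenceList.flatMap (fun r => pl.filter (fun y => y == r))
        ++ pl.filter (fun y => !(pvReferenceList.contains y)) := by
  show PySem.List.sorted pl pvKey false = _
  exact pv_sorted_eq_part pvKey 8 pvReferenceList (by decide) pv_key_of_not_mem (by decide) pl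

theorem pv_B_eq_part (pl : List String) :
    sort_plot_labels_alt pl
      = pvReferenceList.flatMap (fun r => pl.filter (fun y => y == r))
        ++ pl.filter (fun y => !(pvReferenceList.contains y)) := by
  unfold sort_plot_labels_alt
  simp only []
  have h1 : ∀ (acc : List String),
      pvReferenceList.foldl
        (fun acc ref => pl.foldl (fun a2 x => if x == ref then a2 ++ [x] else a2) acc) acc
      = acc ++ pvReferenceList.flatMap (fun r => pl.filter (fun y => y == r)) := by
    intro acc
    have : ∀ (ref : String) (acc : List String),
        pl.foldl (fun a2 x => if x == ref then a2 ++ [x] else a2) acc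
        = acc ++ pl.filter (fun y => y == ref) := by
      intro ref acc
      have := PySem.List.foldl_append_if (fun y => y == ref) (fun y => y) pl acc
      simpa using this
    calc pvReferenceList.foldl
          (fun acc ref => pl.foldl (fun a2 x => if x == ref then a2 ++ [x] else a2) acc) acc
        = pvReferenceList.foldl
          (fun acc ref => acc ++ pl.filter (fun y => y == ref)) acc := by
          exact PySem.List.foldl_congr_mem _ _ _ _ (fun acc ref _ => this ref acc)
      _ = acc ++ pvReferenceList.flatMap (fun r => pl.filter (fun y => y == r)) :=
          PySem.List.foldl_append_eq_flatMap _ _ _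
  have h2 : ∀ (acc : List String),
      pl.foldl (fun acc x =>
        if !((PySem.Set.ofList pvReferenceList).contains x) then acc ++ [x] else acc) acc
      = acc ++ pl.filter (fun y => !(pvReferenceList.contains y)) := by
    intro acc
    have hm : ∀ y : String, (PySem.Set.ofList pvReferenceList).contains y
        = pvReferenceList.contains y := by
      intro y
      by_cases hy : y ∈ pvReferenceList
      · simp [hy, (PySem.Set.mem_ofList pvReferenceList y).2 hy]
      · have hns : y ∉ PySem.Set.ofList pvReferenceList :=
          fun h => hy ((PySem.Set.mem_ofList pvReferenceList y).1 h)
        simp [hy, hns]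
    have := PySem.List.foldl_append_if
      (fun y => !((PySem.Set.ofList pvReferenceList).contains y)) (fun y => y) pl acc
    simp only [List.map_id'] at this
    rw [this]
    simp only [hm]
  rw [h1, h2]
  simp

-- ===== VERDICT (by name: the statement is the Claim_ definition above) =====
theorem sort_plot_labels_spec : Claim_equal_sort_plot_labels := by
  intro pl _
  show sort_plot_labels pl = sort_plot_labels_alt pl
  rw [pv_A_eq_part, pv_B_eq_part]
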